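-- pv_equiv track=rewrite | github.com/peytontolbert/agent_kernel | agent_kernel/tasking/curriculum.py | _late_wave_rotation_candidate_families
-- ===== SOURCE A (Python) =====
-- _LATE_WAVE_ROTATION_FAMILIES = (
--     "validation",
--     "governance",
--     "oversight",
--     "assurance",
--     "adjudication",
-- )
--
-- def _late_wave_rotation_candidate_families(source_family: str) -> list[str]:
--     if source_family not in _LATE_WAVE_ROTATION_FAMILIES:
--         return []
--     source_index = _LATE_WAVE_ROTATION_FAMILIES.index(source_family)
--     ordered: list[str] = []
--     for offset in range(1, len(_LATE_WAVE_ROTATION_FAMILIES)):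
--         ordered.append(
--             _LATE_WAVE_ROTATION_FAMILIES[
--                 (source_index + offset) % len(_LATE_WAVE_ROTATION_FAMILIES)
--             ]
--         )
--     return ordered
-- ===== SOURCE B (Python) =====
-- _LATE_WAVE_ROTATION_FAMILIES = (
--     "validation",
--     "governance",
--     "oversight",
--     "assurance",
--     "adjudication",
-- )
--
-- def _late_wave_rotation_candidate_families(source_family: str) -> list[str]:
--     if source_family not in _LATE_WAVE_ROTATION_FAMILIES:
--         return []
--     i = _LATE_WAVE_ROTATION_FAMILIES.index(source_family)
--     return list(_LATE_WAVE_ROTATION_FAMILIES[i + 1:]) + list(_LATE_WAVE_ROTATION_FAMILIES[:i])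
-- ===== Notes on version B (the rewrite author's own statement) =====
-- stated objective: simpler
-- what changed: Replaces the offset loop with modular indexing by two slices concatenated (tail after the source, then the prefix before it).
import Mathlib
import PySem

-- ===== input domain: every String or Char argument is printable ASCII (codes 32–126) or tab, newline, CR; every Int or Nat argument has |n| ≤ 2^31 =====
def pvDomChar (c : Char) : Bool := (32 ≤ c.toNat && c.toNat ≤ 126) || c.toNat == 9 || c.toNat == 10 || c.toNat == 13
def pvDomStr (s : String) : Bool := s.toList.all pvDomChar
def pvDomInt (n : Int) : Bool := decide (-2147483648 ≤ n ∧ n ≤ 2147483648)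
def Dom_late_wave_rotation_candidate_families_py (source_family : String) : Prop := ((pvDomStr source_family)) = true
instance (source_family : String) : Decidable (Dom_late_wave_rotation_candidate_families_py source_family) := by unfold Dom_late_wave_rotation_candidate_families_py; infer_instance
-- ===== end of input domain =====

-- B replaces A's offset loop with modular indexing by two slices concatenated; objective: simpler.

-- ===== PORT A =====
-- _LATE_WAVE_ROTATION_FAMILIES (module constant)
def pvFamilies : List String :=
  ["validation", "governance", "oversight", "assurance", "adjudication"]

-- literal port of A: membership guard, .index, then a loop over range(1, len) appending
-- the element at (source_index + offset) % len (in range under the guard, so getD "" is never hit)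
def late_wave_rotation_candidate_families_py (source_family : String) : List String :=
  if ¬ pvFamilies.contains source_family then []
  else
    let source_index : Int := ((PySem.List.index? pvFamilies source_family).getD 0 : Nat)
    (PySem.List.pyRange 1 (pvFamilies.length : Int) 1).foldl
      (fun ordered offset =>
        ordered ++
          [(PySem.List.pyGet? pvFamilies
              (PySem.Int.mod (source_index + offset) (pvFamilies.length : Int))).getD ""])
      []

-- ===== PORT B =====
-- literal port of B: same guard, then families[i+1:] + families[:i]
def late_wave_rotation_candidate_families_py_alt (source_family : String) : List String :=
  if ¬ pvFamilies.contains source_family then []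
  else
    let i : Int := ((PySem.List.index? pvFamilies source_family).getD 0 : Nat)
    PySem.List.slice pvFamilies (some (i + 1)) none ++
      PySem.List.slice pvFamilies none (some i)

-- ===== PRECONDITION & SPEC =====
def Spec_late_wave_rotation_candidate_families_py (source_family : String) (out : List String) : Prop := out = late_wave_rotation_candidate_families_py_alt source_family
instance (source_family : String) (out : List String) : Decidable (Spec_late_wave_rotation_candidate_families_py source_family out) := by unfold Spec_late_wave_rotation_candidate_families_py; infer_instance

-- ===== CLAIM (what is proved, stated in full; the proofs are below) =====
def Claim_equal_late_wave_rotation_candidate_families_py : Prop := ∀ (source_family : String), Dom_late_wave_rotation_candidate_families_py source_family → Spec_late_wave_rotation_candidate_families_py source_family (late_wave_rotation_candidate_families_py source_family)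

-- ===== LEMMAS AND PROOFS =====
theorem pv_nonmember (s : String) (h : ¬ pvFamilies.contains s) :
    late_wave_rotation_candidate_families_py s
      = late_wave_rotation_candidate_families_py_alt s := by
  have h' : s ∉ pvFamilies := by simpa using h
  simp [late_wave_rotation_candidate_families_py,
        late_wave_rotation_candidate_families_py_alt, h']

-- ===== VERDICT (by name: the statement is the Claim_ definition above) =====
theorem late_wave_rotation_candidate_families_py_spec : Claim_equal_late_wave_rotation_candidate_families_py := by
  intro s _
  unfold Spec_late_wave_rotation_candidate_families_py
  by_cases h : pvFamilies.contains s
  · have hm : s ∈ pvFamilies := by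
      simpa using h
    simp only [pvFamilies, List.mem_cons, List.not_mem_nil, or_false] at hm
    rcases hm with rfl | rfl | rfl | rfl | rfl <;> decide
  · exact pv_nonmember s h
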